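-- pv_equiv track=rewrite | github.com/clararehmann/geans | scripts/go_terms_stats.py | stackchildren
-- ===== SOURCE A (Python) =====
-- def getchildren(gterm, go2children_isa):
--     return go2children_isa.get(gterm, [])
--
-- def stackchildren(gterm, gochildren):
--     children = getchildren(gterm, gochildren)
--     stacked = []
--     stacked.extend(f"{gterm};{c}" for c in children)
--     while children:
--         stacked.extend(f"{c};{child}" for c in children for child in getchildren(c, gochildren))
--         children = [child for c in children for child in getchildren(c, gochildren)]
--     return stacked
-- ===== SOURCE B (Python) =====
-- def stackchildren(gterm, gochildren):
--     stacked = []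
--     queue = [gterm]
--     i = 0
--     while i < len(queue):
--         n = queue[i]
--         i += 1
--         for c in gochildren.get(n, []):
--             stacked.append(f"{n};{c}")
--             queue.append(c)
--     return stacked
-- ===== Notes on version B (the rewrite author's own statement) =====
-- stated objective: alternative
-- what changed: Replaces the level-by-level frontier rebuild (two nested generator passes per round, recomputing every node's child list twice) with a single index-scanned FIFO queue that expands one node at a time, looking each node's children up once; the emitted pair order is identical.
import Mathlib
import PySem

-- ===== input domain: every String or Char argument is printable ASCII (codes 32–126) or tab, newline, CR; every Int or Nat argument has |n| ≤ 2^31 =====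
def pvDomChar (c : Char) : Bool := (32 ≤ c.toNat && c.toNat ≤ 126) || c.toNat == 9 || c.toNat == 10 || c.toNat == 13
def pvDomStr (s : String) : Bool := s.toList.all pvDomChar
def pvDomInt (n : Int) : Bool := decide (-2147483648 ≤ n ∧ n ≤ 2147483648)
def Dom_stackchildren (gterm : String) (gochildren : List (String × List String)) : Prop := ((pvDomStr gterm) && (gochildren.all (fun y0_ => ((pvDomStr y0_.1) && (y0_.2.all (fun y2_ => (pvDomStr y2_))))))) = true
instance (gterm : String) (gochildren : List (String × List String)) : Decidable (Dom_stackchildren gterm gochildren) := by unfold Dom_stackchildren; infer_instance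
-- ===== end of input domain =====

-- B replaces A's level-by-level frontier rebuild with a single index-scanned FIFO queue expanding
-- one node at a time (same pair strings, identical order); equivalence is proved on inputs where
-- A's while-loop terminates (Pre_: no cycle reachable from gterm).

-- ===== PORT A =====
-- go2children_isa.get(gterm, []): dict lookup with default (first match on the association list)
def pvGetchildren (gterm : String) (go : List (String × List String)) : List String :=
  (PySem.Dict.mk go).getD gterm []

-- children = [child for c in children for child in getchildren(c, gochildren)]
def pvStep (go : List (String × List String)) (c : List String) : List String :=
  c.flatMap (fun u => pvGetchildren u go)

-- stacked.extend(f"{c};{child}" for c in children for child in getchildren(c, gochildren))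
def pvEmit (go : List (String × List String)) (c : List String) : List String :=
  c.flatMap (fun u => (pvGetchildren u go).map (fun v => u ++ ";" ++ v))

-- A's 'while children:' loop; the fuel argument is only a totality guard — under
-- Pre_ the frontier is empty after at most gochildren.length + 1 rounds.
def pvLoopA (go : List (String × List String)) : Nat → List String → List String → List String
  | 0, _, stacked => stacked
  | f + 1, children, stacked =>
    if children.isEmpty then stacked
    else pvLoopA go f (pvStep go children) (stacked ++ pvEmit go children)

def stackchildren (gterm : String) (gochildren : List (String × List String)) : List String :=
  pvLoopA gochildren (gochildren.length + 1) (pvGetchildren gterm gochildren)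
    ((pvGetchildren gterm gochildren).map (fun c => gterm ++ ";" ++ c))

-- ===== PORT B =====
-- totality guard for B's queue loop: the number of nodes the queue will ever hold
-- (1 for gterm plus the sizes of the next k - 1 frontiers)
def pvFuelB (go : List (String × List String)) : Nat → List String → Nat
  | 0, _ => 0
  | k + 1, c => c.length + pvFuelB go k (pvStep go c)

-- B's 'while i < len(queue):' loop: pop queue[i], emit its pairs, append its children
def pvLoopB (go : List (String × List String)) : Nat → List String → Nat → List String → List String
  | 0, _, _, stacked => stacked
  | f + 1, q, i, stacked =>
    if h : i < q.length then
      pvLoopB go f (q ++ pvGetchildren q[i] go) (i + 1)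
        (stacked ++ (pvGetchildren q[i] go).map (fun c => q[i] ++ ";" ++ c))
    else stacked

def stackchildren_alt (gterm : String) (gochildren : List (String × List String)) : List String :=
  pvLoopB gochildren (pvFuelB gochildren (gochildren.length + 2) [gterm]) [gterm] 0 []

-- ===== PRECONDITION & SPEC =====
-- the deduplicated set of nodes reachable from s by walks of exactly k steps
def pvReach (go : List (String × List String)) : Nat → List String → List String
  | 0, s => s
  | k + 1, s => pvReach go k (PySem.Set.ofList (pvStep go s))

-- Pre_ excludes exactly the inputs on which A's while-loop never terminates: it requires that no
-- walk of length gochildren.length + 1 leaves gterm (the standard bounded-walk criterion for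
-- "no cycle is reachable from gterm", stated on the deduplicated reachability sets, so it is a
-- polynomial-size graph property of the input, not A's duplicate-expanding loop).
def Pre_stackchildren (gterm : String) (gochildren : List (String × List String)) : Prop :=
  pvReach gochildren (gochildren.length + 1) [gterm] = []
instance (gterm : String) (gochildren : List (String × List String)) : Decidable (Pre_stackchildren gterm gochildren) := by unfold Pre_stackchildren; infer_instance

def pvWitness_stackchildren : String × (List (String × List String)) :=
  ("a", [("a", ["b", "c"]), ("b", ["c"])])

def Spec_stackchildren (gterm : String) (gochildren : List (String × List String)) (out : List String) : Prop := out = stackchildren_alt gterm gochildren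
instance (gterm : String) (gochildren : List (String × List String)) (out : List String) : Decidable (Spec_stackchildren gterm gochildren out) := by unfold Spec_stackchildren; infer_instance

-- ===== CLAIM (what is proved, stated in full; the proofs are below) =====
def Claim_equal_stackchildren : Prop := ∀ (gterm : String) (gochildren : List (String × List String)), Dom_stackchildren gterm gochildren → Pre_stackchildren gterm gochildren → Spec_stackchildren gterm gochildren (stackchildren gterm gochildren)

-- ===== LEMMAS AND PROOFS =====

-- pop-front view of B's loop (proof-side only)
def pvLoopQ (go : List (String × List String)) : Nat → List String → List String → List String
  | 0, _, st => st
  | _ + 1, [], st => st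
  | f + 1, n :: rest, st =>
    pvLoopQ go f (rest ++ pvGetchildren n go) (st ++ (pvGetchildren n go).map (fun c => n ++ ";" ++ c))

-- the frontier after k undeduplicated rounds of A's loop
def pvIter (go : List (String × List String)) : Nat → List String → List String
  | 0, c => c
  | k + 1, c => pvIter go k (pvStep go c)

theorem pvLoopB_eq_loopQ (go : List (String × List String)) :
    ∀ (f : Nat) (q : List String) (i : Nat) (st : List String), i ≤ q.length →
      pvLoopB go f q i st = pvLoopQ go f (q.drop i) st := by
  intro f
  induction f with
  | zero => intro q i st _; rfl
  | succ f ih =>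
    intro q i st hle
    by_cases h : i < q.length
    · rw [pvLoopB]
      simp only [h, dif_pos]
      rw [ih _ _ _ (by simp; omega)]
      rw [List.drop_append_of_le_length (by omega), List.drop_eq_getElem_cons h, pvLoopQ]
    · rw [pvLoopB]
      simp only [h, dif_neg, not_false_iff]
      have : q.drop i = [] := List.drop_eq_nil_of_le (by omega)
      rw [this, pvLoopQ]

theorem pvLoopQ_levels (go : List (String × List String)) :
    ∀ (xs : List String) (f : Nat) (tail st : List String),
      pvLoopQ go (xs.length + f) (xs ++ tail) st
        = pvLoopQ go f (tail ++ pvStep go xs) (st ++ pvEmit go xs) := by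
  intro xs
  induction xs with
  | nil => intro f tail st; simp [pvStep, pvEmit]
  | cons x xs ih =>
    intro f tail st
    have hlen : (x :: xs).length + f = (xs.length + f) + 1 := by simp; omega
    rw [hlen]
    show pvLoopQ go ((xs.length + f) + 1) (x :: (xs ++ tail)) st = _
    rw [pvLoopQ, List.append_assoc, ih f (tail ++ pvGetchildren x go)]
    simp [pvStep, pvEmit, List.append_assoc]

theorem pvIter_mono (go : List (String × List String)) :
    ∀ (k : Nat) (c : List String), pvIter go k c = [] → pvIter go (k + 1) c = [] := by
  intro k
  induction k with
  | zero =>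
    intro c hc
    have : c = [] := hc
    subst this
    simp [pvIter, pvStep]
  | succ k ih =>
    intro c hc
    have := ih (pvStep go c) hc
    exact this

theorem pvLoopQ_eq_loopA (go : List (String × List String)) :
    ∀ (fA : Nat) (c : List String) (st : List String) (fB : Nat),
      pvIter go fA c = [] → pvFuelB go fA c ≤ fB →
      pvLoopQ go fB c st = pvLoopA go fA c st := by
  intro fA
  induction fA with
  | zero =>
    intro c st fB hc _
    have : c = [] := hc
    subst this
    cases fB <;> rfl
  | succ fA ih =>
    intro c st fB hc hfuel
    by_cases hcn : c = []
    · subst hcn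
      rw [pvLoopA]
      simp only [List.isEmpty_nil, if_pos]
      cases fB <;> rfl
    · have hfB : fB = c.length + (fB - c.length) := by
        have : c.length ≤ fB := le_trans (by rw [pvFuelB]; omega) hfuel
        omega
      rw [hfB]
      have := pvLoopQ_levels go c (fB - c.length) [] st
      simp only [List.append_nil, List.nil_append] at this
      rw [this]
      rw [pvLoopA]
      simp only [List.isEmpty_iff, hcn, if_neg, not_false_iff]
      apply ih
      · exact hc
      · rw [pvFuelB] at hfuel; omega

theorem pvReach_mem (go : List (String × List String)) :
    ∀ (k : Nat) (s t : List String), (∀ x, x ∈ s ↔ x ∈ t) →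
      ∀ y, (y ∈ pvReach go k s ↔ y ∈ pvIter go k t) := by
  intro k
  induction k with
  | zero => intro s t hst y; exact hst y
  | succ k ih =>
    intro s t hst y
    apply ih
    intro x
    rw [PySem.Set.mem_ofList]
    simp only [pvStep, List.mem_flatMap]
    constructor
    · rintro ⟨u, hu, hx⟩; exact ⟨u, (hst u).mp hu, hx⟩
    · rintro ⟨u, hu, hx⟩; exact ⟨u, (hst u).mpr hu, hx⟩

theorem pvStep_singleton (go : List (String × List String)) (g : String) :
    pvStep go [g] = pvGetchildren g go := by
  simp [pvStep]

-- ===== VERDICT (by name: the statement is the Claim_ definition above) =====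
theorem stackchildren_spec : Claim_equal_stackchildren := by
  intro gterm go _ hpre
  unfold Spec_stackchildren stackchildren stackchildren_alt Pre_stackchildren at *
  -- the undeduplicated frontier is also empty after gochildren.length + 1 rounds
  have hiter : pvIter go (go.length + 1) [gterm] = [] := by
    apply List.eq_nil_iff_forall_not_mem.mpr
    intro y hy
    have := (pvReach_mem go (go.length + 1) [gterm] [gterm] (fun _ => Iff.rfl) y).mpr hy
    rw [hpre] at this
    exact absurd this (List.not_mem_nil)
  have hiter' : pvIter go (go.length + 1) (pvGetchildren gterm go) = [] := by
    have h1 : pvIter go (go.length) (pvGetchildren gterm go) = [] := by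
      have : pvIter go (go.length + 1) [gterm] = pvIter go (go.length) (pvStep go [gterm]) := rfl
      rw [this, pvStep_singleton] at hiter
      exact hiter
    exact pvIter_mono go _ _ h1
  -- B's fuel splits off the one unit spent on gterm itself
  have hfuel : pvFuelB go (go.length + 2) [gterm]
      = 1 + pvFuelB go (go.length + 1) (pvGetchildren gterm go) := by
    rw [pvFuelB, pvStep_singleton]
    simp
  rw [hfuel]
  rw [pvLoopB_eq_loopQ go _ [gterm] 0 [] (by simp)]
  simp only [List.drop_zero]
  have h1 : (1 : Nat) + pvFuelB go (go.length + 1) (pvGetchildren gterm go)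
      = [gterm].length + pvFuelB go (go.length + 1) (pvGetchildren gterm go) := by simp
  rw [h1]
  have := pvLoopQ_levels go [gterm] (pvFuelB go (go.length + 1) (pvGetchildren gterm go)) [] []
  simp only [List.append_nil, List.nil_append] at this
  rw [this, pvStep_singleton]
  have hemit : pvEmit go [gterm] = (pvGetchildren gterm go).map (fun c => gterm ++ ";" ++ c) := by
    simp [pvEmit]
  rw [hemit]
  exact (pvLoopQ_eq_loopA go (go.length + 1) (pvGetchildren gterm go) _ _ hiter' (le_refl _)).symm
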